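-- pv_equiv track=rewrite | github.com/raeez/chiral-bar-cobar | compute/lib/w3_bar_extended.py | dim_vbar_gf
-- ===== SOURCE A (Python) =====
-- from typing import Dict, List, Optional, Tuple
--
-- def dim_vbar_gf(max_h: int) -> Dict[int, int]:
--     """Compute dim V-bar_h for h=0,...,max_h using the generating function.
--
--     GF = prod_{n>=2} 1/(1-q^n) * prod_{n>=3} 1/(1-q^n) - 1
--     """
--     c_L = [0] * (max_h + 1)
--     c_L[0] = 1
--     for n in range(2, max_h + 1):
--         for k in range(n, max_h + 1):
--             c_L[k] += c_L[k - n]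
--
--     c_W = [0] * (max_h + 1)
--     c_W[0] = 1
--     for n in range(3, max_h + 1):
--         for k in range(n, max_h + 1):
--             c_W[k] += c_W[k - n]
--
--     product = [0] * (max_h + 1)
--     for i in range(max_h + 1):
--         for j in range(max_h + 1 - i):
--             product[i + j] += c_L[i] * c_W[j]
--     product[0] -= 1  # subtract vacuum
--
--     return {h: product[h] for h in range(max_h + 1)}
-- ===== SOURCE B (Python) =====
-- def _sieve(coeff, n, max_h):
--     for k in range(n, max_h + 1):
--         coeff[k] += coeff[k - n]
--
--
-- def dim_vbar_gf(max_h: int):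
--     """Compute dim V-bar_h using the generating function.
--
--     Single coefficient array: apply the partition-sieve update (multiplication
--     by one factor of the generating-function product) once per part size of
--     the first factor and once more per part size of the second, then subtract
--     the vacuum term.  No explicit convolution needed.
--     """
--     coeff = [0] * (max_h + 1)
--     coeff[0] = 1
--     for n in range(2, max_h + 1):
--         _sieve(coeff, n, max_h)
--     for n in range(3, max_h + 1):
--         _sieve(coeff, n, max_h)
--     coeff[0] -= 1
--     return {h: coeff[h] for h in range(max_h + 1)}
-- ===== Notes on version B (the rewrite author's own statement) =====
-- stated objective: alternative
-- what changed: B keeps a single coefficient array and applies the partition-sieve update once per part size of the first generating-function factor and once more per part size of the second, eliminating A's second array and its explicit convolution loop.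
import Mathlib
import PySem

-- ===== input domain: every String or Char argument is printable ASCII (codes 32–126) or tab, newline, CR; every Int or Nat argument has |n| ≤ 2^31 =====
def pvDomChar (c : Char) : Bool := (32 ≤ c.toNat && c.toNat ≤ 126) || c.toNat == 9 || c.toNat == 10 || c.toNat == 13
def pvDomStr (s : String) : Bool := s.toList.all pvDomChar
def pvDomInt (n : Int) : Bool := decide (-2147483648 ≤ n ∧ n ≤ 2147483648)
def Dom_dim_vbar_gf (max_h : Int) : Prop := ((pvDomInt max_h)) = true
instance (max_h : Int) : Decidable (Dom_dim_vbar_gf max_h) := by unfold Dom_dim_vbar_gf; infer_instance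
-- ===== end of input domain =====

-- B keeps one coefficient array and applies the partition-sieve update once per part size of
-- each generating-function factor, dropping A's second array and its explicit convolution loop
-- (objective: alternative — same asymptotic cost, without the convolution pass).

-- ===== PORT A =====
-- shared helper: the inner sieve loop 'for k in range(n, max_h+1): c[k] += c[k-n]',
-- which appears verbatim in both Python sources
def sievePass (n max_h : Int) (c : List Int) : List Int :=
  (PySem.List.pyRange n (max_h + 1) 1).foldl
    (fun c k =>
      PySem.List.pySetD c k (PySem.List.pyGetD c k 0 + PySem.List.pyGetD c (k - n) 0)) c

def dim_vbar_gf (max_h : Int) : List (Int × Int) :=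
  let c_L0 := PySem.List.pySetD (PySem.List.pyRepeat [(0 : Int)] (max_h + 1)) 0 1
  let c_L := (PySem.List.pyRange 2 (max_h + 1) 1).foldl (fun c n => sievePass n max_h c) c_L0
  let c_W0 := PySem.List.pySetD (PySem.List.pyRepeat [(0 : Int)] (max_h + 1)) 0 1
  let c_W := (PySem.List.pyRange 3 (max_h + 1) 1).foldl (fun c n => sievePass n max_h c) c_W0
  let product0 := PySem.List.pyRepeat [(0 : Int)] (max_h + 1)
  let product :=
    (PySem.List.pyRange 0 (max_h + 1) 1).foldl (fun p i =>
      (PySem.List.pyRange 0 (max_h + 1 - i) 1).foldl (fun p j =>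
        PySem.List.pySetD p (i + j)
          (PySem.List.pyGetD p (i + j) 0 +
            PySem.List.pyGetD c_L i 0 * PySem.List.pyGetD c_W j 0)) p) product0
  let product := PySem.List.pySetD product 0 (PySem.List.pyGetD product 0 0 - 1)
  (PySem.List.pyRange 0 (max_h + 1) 1).map (fun h => (h, PySem.List.pyGetD product h 0))

-- ===== PORT B =====
def dim_vbar_gf_alt (max_h : Int) : List (Int × Int) :=
  let coeff0 := PySem.List.pySetD (PySem.List.pyRepeat [(0 : Int)] (max_h + 1)) 0 1
  let coeff1 := (PySem.List.pyRange 2 (max_h + 1) 1).foldl (fun c n => sievePass n max_h c) coeff0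
  let coeff2 := (PySem.List.pyRange 3 (max_h + 1) 1).foldl (fun c n => sievePass n max_h c) coeff1
  let coeff := PySem.List.pySetD coeff2 0 (PySem.List.pyGetD coeff2 0 0 - 1)
  (PySem.List.pyRange 0 (max_h + 1) 1).map (fun h => (h, PySem.List.pyGetD coeff h 0))

-- ===== PRECONDITION & SPEC =====
-- For negative max_h the Python A builds an empty list and its initial assignment into it
-- raises IndexError (B raises identically there); Pre_ excludes exactly those inputs.
def Pre_dim_vbar_gf (max_h : Int) : Prop := 0 ≤ max_h
instance (max_h : Int) : Decidable (Pre_dim_vbar_gf max_h) := by unfold Pre_dim_vbar_gf; infer_instance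
def pvWitness_dim_vbar_gf : Int := (6)

def Spec_dim_vbar_gf (max_h : Int) (out : List (Int × Int)) : Prop := out = dim_vbar_gf_alt max_h
instance (max_h : Int) (out : List (Int × Int)) : Decidable (Spec_dim_vbar_gf max_h out) := by unfold Spec_dim_vbar_gf; infer_instance

-- ===== CLAIM (what is proved, stated in full; the proofs are below) =====
def Claim_equal_dim_vbar_gf : Prop := ∀ (max_h : Int), Dom_dim_vbar_gf max_h → Pre_dim_vbar_gf max_h → Spec_dim_vbar_gf max_h (dim_vbar_gf max_h)

-- ===== LEMMAS AND PROOFS =====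

-- δ, the coefficient function of the power series 1 (= the freshly initialised array)
def deltaF (k : ℕ) : ℤ := if k = 0 then 1 else 0

-- abstract effect of one sieve pass with part size n (multiplication by 1/(1-q^n))
def passF (n : ℕ) (f : ℕ → ℤ) (k : ℕ) : ℤ :=
  if _ : 0 < n ∧ n ≤ k then f k + passF n f (k - n) else f k
termination_by k
decreasing_by omega

def geomF (n : ℕ) (k : ℕ) : ℤ := if n ∣ k then 1 else 0

def convF (c d : ℕ → ℤ) (k : ℕ) : ℤ := ∑ i ∈ Finset.range (k + 1), c i * d (k - i)

def foldPass (ns : List ℕ) (f : ℕ → ℤ) : ℕ → ℤ := ns.foldl (fun g n => passF n g) f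

theorem passF_small (n : ℕ) (f : ℕ → ℤ) (k : ℕ) (h : ¬ (0 < n ∧ n ≤ k)) : passF n f k = f k := by
  rw [passF]; simp [h]

theorem set_map_range (f : ℕ → ℤ) (L a : ℕ) (v : ℤ) :
    ((List.range L).map f).set a v
      = (List.range L).map (fun k => if k = a then v else f k) := by
  apply List.ext_getElem
  · simp
  · intro i h1 h2
    rw [List.getElem_set]
    by_cases h : a = i
    · simp [h]
    · simp [h, Ne.symm h]

theorem sieve_loop (n m : ℕ) (hn : 1 ≤ n) (f : ℕ → ℤ) (a : ℕ) (hna : n ≤ a) :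
    (PySem.List.pyRange (a : ℤ) ((m : ℤ) + 1) 1).foldl
      (fun c k =>
        PySem.List.pySetD c k (PySem.List.pyGetD c k 0 + PySem.List.pyGetD c (k - (n : ℤ)) 0))
      ((List.range (m + 1)).map (fun k => if k < a then passF n f k else f k))
    = (List.range (m + 1)).map (passF n f) := by
  by_cases hend : (m : ℤ) + 1 ≤ (a : ℤ)
  · rw [PySem.List.pyRange_one_eq_nil hend, List.foldl_nil]
    apply List.map_congr_left
    intro k hk
    rw [List.mem_range] at hk
    have : k < a := by omega
    simp [this]
  · have hlt : (a : ℤ) < (m : ℤ) + 1 := by omega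
    have ham : a < m + 1 := by omega
    rw [PySem.List.pyRange_one_cons hlt, List.foldl_cons]
    have hget1 : PySem.List.pyGetD
        ((List.range (m + 1)).map (fun k => if k < a then passF n f k else f k)) (a : ℤ) 0
        = f a := by
      rw [PySem.List.pyGetD_natCast, PySem.List.getD_map_range _ _ _ _ ham]
      simp
    have hcast : (a : ℤ) - (n : ℤ) = ((a - n : ℕ) : ℤ) := by omega
    have hget2 : PySem.List.pyGetD
        ((List.range (m + 1)).map (fun k => if k < a then passF n f k else f k))
        ((a : ℤ) - (n : ℤ)) 0 = passF n f (a - n) := by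
      rw [hcast, PySem.List.pyGetD_natCast,
        PySem.List.getD_map_range _ _ _ _ (by omega : a - n < m + 1)]
      rw [if_pos (by omega : a - n < a)]
    rw [hget1, hget2, PySem.List.pySetD_natCast, set_map_range]
    have hfun : ((List.range (m + 1)).map
        (fun k => if k = a then f a + passF n f (a - n) else if k < a then passF n f k else f k))
        = (List.range (m + 1)).map (fun k => if k < a + 1 then passF n f k else f k) := by
      apply List.map_congr_left
      intro k hk
      by_cases hka : k = a
      · subst hka
        rw [if_pos rfl, if_pos (by omega)]
        have hpa : passF n f k = f k + passF n f (k - n) := by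
          conv_lhs => rw [passF]
          rw [dif_pos ⟨by omega, hna⟩]
        rw [hpa]
      · rw [if_neg hka]
        by_cases hlt' : k < a
        · rw [if_pos hlt', if_pos (by omega)]
        · rw [if_neg hlt', if_neg (by omega)]
    rw [hfun]
    exact sieve_loop n m hn f (a + 1) (by omega)
termination_by m + 1 - a
decreasing_by omega

theorem sievePass_eq (n m : ℕ) (hn : 1 ≤ n) (f : ℕ → ℤ) :
    sievePass (n : ℤ) (m : ℤ) ((List.range (m + 1)).map f)
      = (List.range (m + 1)).map (passF n f) := by
  unfold sievePass
  have hinit : (List.range (m + 1)).map f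
      = (List.range (m + 1)).map (fun k => if k < n then passF n f k else f k) := by
    apply List.map_congr_left
    intro k hk
    by_cases hkn : k < n
    · rw [if_pos hkn, passF_small n f k (by omega)]
    · rw [if_neg hkn]
  rw [hinit]
  exact sieve_loop n m hn f n le_rfl

theorem foldSieve (m a : ℕ) (ha : 1 ≤ a) (f : ℕ → ℤ) :
    (PySem.List.pyRange (a : ℤ) ((m : ℤ) + 1) 1).foldl (fun c n => sievePass n (m : ℤ) c)
      ((List.range (m + 1)).map f)
    = (List.range (m + 1)).map (foldPass (List.range' a (m + 1 - a)) f) := by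
  by_cases hend : (m : ℤ) + 1 ≤ (a : ℤ)
  · rw [PySem.List.pyRange_one_eq_nil hend, List.foldl_nil]
    have : m + 1 - a = 0 := by omega
    rw [this]
    rfl
  · have hlt : (a : ℤ) < (m : ℤ) + 1 := by omega
    rw [PySem.List.pyRange_one_cons hlt, List.foldl_cons, sievePass_eq a m ha f]
    have ht : m + 1 - a = (m + 1 - (a + 1)) + 1 := by omega
    rw [ht, List.range'_succ]
    have : foldPass (a :: List.range' (a + 1) (m + 1 - (a + 1))) f
        = foldPass (List.range' (a + 1) (m + 1 - (a + 1))) (passF a f) := rfl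
    rw [this]
    exact foldSieve m (a + 1) (by omega) (passF a f)
termination_by m + 1 - a
decreasing_by omega

theorem conv_inner' (m a b : ℕ) (ham : a ≤ m) (c : ℤ) (fW q : ℕ → ℤ) :
    (PySem.List.pyRange (b : ℤ) ((m : ℤ) + 1 - (a : ℤ)) 1).foldl
      (fun p j =>
        PySem.List.pySetD p ((a : ℤ) + j)
          (PySem.List.pyGetD p ((a : ℤ) + j) 0 +
            c * PySem.List.pyGetD ((List.range (m + 1)).map fW) j 0))
      ((List.range (m + 1)).map (fun k => q k + if a ≤ k ∧ k < a + b then c * fW (k - a) else 0))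
    = (List.range (m + 1)).map (fun k => q k + if a ≤ k then c * fW (k - a) else 0) := by
  by_cases hend : (m : ℤ) + 1 - (a : ℤ) ≤ (b : ℤ)
  · rw [PySem.List.pyRange_one_eq_nil hend, List.foldl_nil]
    apply List.map_congr_left
    intro k hk
    rw [List.mem_range] at hk
    by_cases hak : a ≤ k
    · rw [if_pos ⟨hak, by omega⟩, if_pos hak]
    · rw [if_neg (by omega), if_neg hak]
  · have hlt : (b : ℤ) < (m : ℤ) + 1 - (a : ℤ) := by omega
    rw [PySem.List.pyRange_one_cons hlt, List.foldl_cons]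
    have hcast : (a : ℤ) + (b : ℤ) = ((a + b : ℕ) : ℤ) := by omega
    have habm : a + b < m + 1 := by omega
    have hgetW : PySem.List.pyGetD ((List.range (m + 1)).map fW) (b : ℤ) 0 = fW b := by
      rw [PySem.List.pyGetD_natCast, PySem.List.getD_map_range _ _ _ _ (by omega : b < m + 1)]
    have hgetP : PySem.List.pyGetD
        ((List.range (m + 1)).map (fun k => q k + if a ≤ k ∧ k < a + b then c * fW (k - a) else 0))
        ((a : ℤ) + (b : ℤ)) 0 = q (a + b) := by
      rw [hcast, PySem.List.pyGetD_natCast, PySem.List.getD_map_range _ _ _ _ habm]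
      rw [if_neg (by omega)]
      ring
    rw [hgetW, hgetP, hcast, PySem.List.pySetD_natCast, set_map_range]
    have hfun : ((List.range (m + 1)).map
        (fun k => if k = a + b then q (a + b) + c * fW b
          else q k + if a ≤ k ∧ k < a + b then c * fW (k - a) else 0))
        = (List.range (m + 1)).map
          (fun k => q k + if a ≤ k ∧ k < a + (b + 1) then c * fW (k - a) else 0) := by
      apply List.map_congr_left
      intro k hk
      by_cases hkab : k = a + b
      · subst hkab
        rw [if_pos rfl, if_pos ⟨by omega, by omega⟩]
        have : a + b - a = b := by omega
        rw [this]
      · rw [if_neg hkab]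
        by_cases hc : a ≤ k ∧ k < a + b
        · rw [if_pos hc, if_pos ⟨hc.1, by omega⟩]
        · rw [if_neg hc, if_neg (by omega)]
    rw [hfun]
    have hb1 : (b : ℤ) + 1 = ((b + 1 : ℕ) : ℤ) := by omega
    rw [hb1]
    exact conv_inner' m a (b + 1) ham c fW q
termination_by m + 1 - a - b
decreasing_by omega

theorem conv_inner (m a : ℕ) (ham : a ≤ m) (fL fW q : ℕ → ℤ) :
    (PySem.List.pyRange 0 ((m : ℤ) + 1 - (a : ℤ)) 1).foldl
      (fun p j =>
        PySem.List.pySetD p ((a : ℤ) + j)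
          (PySem.List.pyGetD p ((a : ℤ) + j) 0 +
            PySem.List.pyGetD ((List.range (m + 1)).map fL) (a : ℤ) 0 *
              PySem.List.pyGetD ((List.range (m + 1)).map fW) j 0))
      ((List.range (m + 1)).map q)
    = (List.range (m + 1)).map (fun k => q k + if a ≤ k then fL a * fW (k - a) else 0) := by
  have hgetL : PySem.List.pyGetD ((List.range (m + 1)).map fL) (a : ℤ) 0 = fL a := by
    rw [PySem.List.pyGetD_natCast, PySem.List.getD_map_range _ _ _ _ (by omega : a < m + 1)]
  have hlam : (fun (p : List ℤ) (j : ℤ) =>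
        PySem.List.pySetD p ((a : ℤ) + j)
          (PySem.List.pyGetD p ((a : ℤ) + j) 0 +
            PySem.List.pyGetD ((List.range (m + 1)).map fL) (a : ℤ) 0 *
              PySem.List.pyGetD ((List.range (m + 1)).map fW) j 0))
      = (fun (p : List ℤ) (j : ℤ) =>
        PySem.List.pySetD p ((a : ℤ) + j)
          (PySem.List.pyGetD p ((a : ℤ) + j) 0 +
            fL a * PySem.List.pyGetD ((List.range (m + 1)).map fW) j 0)) := by
    funext p j
    rw [hgetL]
  rw [hlam]
  have hinit : (List.range (m + 1)).map q
      = (List.range (m + 1)).map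
          (fun k => q k + if a ≤ k ∧ k < a + 0 then fL a * fW (k - a) else 0) := by
    apply List.map_congr_left
    intro k hk
    rw [if_neg (by omega)]
    ring
  rw [hinit]
  have h0 : (0 : ℤ) = ((0 : ℕ) : ℤ) := rfl
  rw [h0]
  exact conv_inner' m a 0 ham (fL a) fW q

theorem conv_outer (m a : ℕ) (fL fW : ℕ → ℤ) :
    (PySem.List.pyRange (a : ℤ) ((m : ℤ) + 1) 1).foldl (fun p i =>
      (PySem.List.pyRange 0 ((m : ℤ) + 1 - i) 1).foldl (fun p j =>
        PySem.List.pySetD p (i + j)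
          (PySem.List.pyGetD p (i + j) 0 +
            PySem.List.pyGetD ((List.range (m + 1)).map fL) i 0 *
              PySem.List.pyGetD ((List.range (m + 1)).map fW) j 0)) p)
      ((List.range (m + 1)).map (fun k => ∑ i ∈ Finset.range (min a (k + 1)), fL i * fW (k - i)))
    = (List.range (m + 1)).map (convF fL fW) := by
  by_cases hend : (m : ℤ) + 1 ≤ (a : ℤ)
  · rw [PySem.List.pyRange_one_eq_nil hend, List.foldl_nil]
    apply List.map_congr_left
    intro k hk
    rw [List.mem_range] at hk
    have : min a (k + 1) = k + 1 := by omega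
    rw [this]
    rfl
  · have hlt : (a : ℤ) < (m : ℤ) + 1 := by omega
    rw [PySem.List.pyRange_one_cons hlt, List.foldl_cons,
      conv_inner m a (by omega) fL fW _]
    have hfun : ((List.range (m + 1)).map
        (fun k => (∑ i ∈ Finset.range (min a (k + 1)), fL i * fW (k - i)) +
          if a ≤ k then fL a * fW (k - a) else 0))
        = (List.range (m + 1)).map
          (fun k => ∑ i ∈ Finset.range (min (a + 1) (k + 1)), fL i * fW (k - i)) := by
      apply List.map_congr_left
      intro k hk
      by_cases hak : a ≤ k
      · rw [if_pos hak]
        have h1 : min a (k + 1) = a := by omega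
        have h2 : min (a + 1) (k + 1) = a + 1 := by omega
        rw [h1, h2, Finset.sum_range_succ]
      · rw [if_neg hak]
        have h1 : min a (k + 1) = k + 1 := by omega
        have h2 : min (a + 1) (k + 1) = k + 1 := by omega
        rw [h1, h2]
        ring
    rw [hfun]
    have ha1 : (a : ℤ) + 1 = ((a + 1 : ℕ) : ℤ) := by omega
    rw [ha1]
    exact conv_outer m (a + 1) fL fW
termination_by m + 1 - a
decreasing_by omega

theorem sum_geom_below (n k t : ℕ) (ht : 1 ≤ t) (htn : t ≤ n ∨ n = 0) (f : ℕ → ℤ) :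
    ∑ i ∈ Finset.range t, geomF n i * f (k - i) = f k := by
  rw [Finset.sum_eq_single_of_mem 0 (Finset.mem_range.mpr (by omega))]
  · simp [geomF]
  · intro i hi hne
    rw [Finset.mem_range] at hi
    have : ¬ n ∣ i := by
      intro hdvd
      rcases htn with h | h
      · exact hne (Nat.eq_zero_of_dvd_of_lt hdvd (by omega))
      · subst h
        exact hne (Nat.zero_dvd.mp hdvd)
    simp [geomF, this]

theorem passF_eq_conv (n : ℕ) (f : ℕ → ℤ) (k : ℕ) : passF n f k = convF (geomF n) f k := by
  rcases Nat.eq_zero_or_pos n with hn0 | hn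
  · subst hn0
    rw [passF_small 0 f k (by omega)]
    exact (sum_geom_below 0 k (k + 1) (by omega) (Or.inr rfl) f).symm
  · induction k using Nat.strong_induction_on with
    | _ k ih =>
      by_cases hkn : k < n
      · rw [passF_small n f k (by omega)]
        unfold convF
        rw [sum_geom_below n k (k + 1) (by omega) (Or.inl (by omega)) f]
      · have hkn' : n ≤ k := by omega
        have hrec : passF n f k = f k + passF n f (k - n) := by
          conv_lhs => rw [passF]
          rw [dif_pos ⟨hn, hkn'⟩]
        rw [hrec, ih (k - n) (by omega)]
        unfold convF
        have hsplit : k + 1 = n + (k - n + 1) := by omega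
        conv_rhs => rw [hsplit, Finset.sum_range_add]
        rw [sum_geom_below n k n (by omega) (Or.inl le_rfl) f]
        congr 1
        apply Finset.sum_congr rfl
        intro i hi
        have hdvd : n ∣ n + i ↔ n ∣ i := Nat.dvd_add_right (dvd_refl n)
        have hsub : k - (n + i) = k - n - i := (Nat.sub_sub k n i).symm
        simp [geomF, hdvd, hsub]

theorem convF_coeff (c d : ℕ → ℤ) (k : ℕ) :
    convF c d k = PowerSeries.coeff (R := ℤ) k (PowerSeries.mk c * PowerSeries.mk d) := by
  rw [PowerSeries.coeff_mul, Finset.Nat.sum_antidiagonal_eq_sum_range_succ_mk]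
  simp [convF]

theorem mk_passF (n : ℕ) (f : ℕ → ℤ) :
    PowerSeries.mk (passF n f) = PowerSeries.mk (geomF n) * PowerSeries.mk f := by
  ext k
  rw [PowerSeries.coeff_mk, passF_eq_conv, convF_coeff]

theorem mk_foldPass (ns : List ℕ) (f : ℕ → ℤ) :
    PowerSeries.mk (foldPass ns f)
      = (ns.map (fun n => PowerSeries.mk (geomF n))).prod * PowerSeries.mk f := by
  induction ns generalizing f with
  | nil => simp [foldPass]
  | cons n ns ih =>
      have : foldPass (n :: ns) f = foldPass ns (passF n f) := rfl
      rw [this, ih, mk_passF, List.map_cons, List.prod_cons]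
      ring

theorem mk_delta : PowerSeries.mk deltaF = (1 : PowerSeries ℤ) := by
  ext k
  rw [PowerSeries.coeff_mk, PowerSeries.coeff_one]
  rfl

theorem key_coeff (ns2 ns3 : List ℕ) (k : ℕ) :
    convF (foldPass ns2 deltaF) (foldPass ns3 deltaF) k = foldPass ns3 (foldPass ns2 deltaF) k := by
  have h1 : foldPass ns3 (foldPass ns2 deltaF) k
      = PowerSeries.coeff (R := ℤ) k (PowerSeries.mk (foldPass ns3 (foldPass ns2 deltaF))) := by
    rw [PowerSeries.coeff_mk]
  simp only [h1, convF_coeff, mk_foldPass, mk_delta, mul_one]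
  congr 1
  ring

theorem init_eq (m : ℕ) :
    PySem.List.pySetD (List.replicate (m + 1) (0 : ℤ)) 0 1
      = (List.range (m + 1)).map deltaF := by
  have hrep : List.replicate (m + 1) (0 : ℤ) = (List.range (m + 1)).map (fun _ => 0) := by
    simp
  have h0 : (0 : ℤ) = ((0 : ℕ) : ℤ) := rfl
  rw [hrep, h0, PySem.List.pySetD_natCast, set_map_range]
  apply List.map_congr_left
  intro k hk
  simp [deltaF]

-- ===== VERDICT (by name: the statement is the Claim_ definition above) =====
theorem dim_vbar_gf_spec : Claim_equal_dim_vbar_gf := by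
  intro max_h hdom hpre
  unfold Pre_dim_vbar_gf at hpre
  obtain ⟨m, rfl⟩ : ∃ m : ℕ, max_h = (m : ℤ) := ⟨max_h.toNat, (Int.toNat_of_nonneg hpre).symm⟩
  show dim_vbar_gf (m : ℤ) = dim_vbar_gf_alt (m : ℤ)
  unfold dim_vbar_gf dim_vbar_gf_alt
  have hrep : PySem.List.pyRepeat [(0 : ℤ)] ((m : ℤ) + 1) = List.replicate (m + 1) 0 := by
    rw [PySem.List.pyRepeat_singleton]
    have : ((m : ℤ) + 1).toNat = m + 1 := by omega
    rw [this]
  have h2 : (2 : ℤ) = ((2 : ℕ) : ℤ) := by norm_num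
  have h3 : (3 : ℤ) = ((3 : ℕ) : ℤ) := by norm_num
  simp only [hrep, init_eq]
  rw [h2, h3, foldSieve m 2 (by omega) deltaF, foldSieve m 3 (by omega) deltaF,
    foldSieve m 3 (by omega) (foldPass (List.range' 2 (m + 1 - 2)) deltaF)]
  have hprod0 : List.replicate (m + 1) (0 : ℤ)
      = (List.range (m + 1)).map
          (fun k => ∑ i ∈ Finset.range (min 0 (k + 1)),
            foldPass (List.range' 2 (m + 1 - 2)) deltaF i *
              foldPass (List.range' 3 (m + 1 - 3)) deltaF (k - i)) := by
    have : List.replicate (m + 1) (0 : ℤ) = (List.range (m + 1)).map (fun _ => 0) := by simp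
    rw [this]
    apply List.map_congr_left
    intro k _
    simp
  have hco := conv_outer m 0 (foldPass (List.range' 2 (m + 1 - 2)) deltaF)
    (foldPass (List.range' 3 (m + 1 - 3)) deltaF)
  simp only [Nat.cast_zero] at hco
  rw [hprod0, hco]
  have hkey : (List.range (m + 1)).map
      (convF (foldPass (List.range' 2 (m + 1 - 2)) deltaF)
        (foldPass (List.range' 3 (m + 1 - 3)) deltaF))
      = (List.range (m + 1)).map
          (foldPass (List.range' 3 (m + 1 - 3)) (foldPass (List.range' 2 (m + 1 - 2)) deltaF)) := by
    apply List.map_congr_left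
    intro k _
    exact key_coeff _ _ k
  rw [hkey]
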